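-- pv_equiv track=rewrite | github.com/PythonAlchemist/advent-of-code | 2023/day2.py | minPossible
-- ===== SOURCE A (Python) =====
-- from collections import defaultdict
--
-- def minPossible(game: dict) -> dict:
--     maxx = defaultdict(int)
--     for i in range(len(game)):
--         for color, num in game[i].items():
--             if num > maxx[color]:
--                 maxx[color] = num
--
--     # calculate power
--     power = 1
--     for color, num in maxx.items():
--         power *= num
--
--     return power
-- ===== SOURCE B (Python) =====
-- def minPossible(game: dict) -> dict:
--     # Gather the distinct colors (first-appearance order), then compute each
--     # color's maximum by a separate scan over all games, multiplying as we go.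
--     colors = {}
--     for g in game:
--         for color in g:
--             colors[color] = True
--     power = 1
--     for color in colors:
--         m = 0
--         for g in game:
--             v = g.get(color, 0)
--             if v > m:
--                 m = v
--         power *= m
--     return power
-- ===== Notes on version B (the rewrite author's own statement) =====
-- stated objective: alternative
-- what changed: Instead of one fused pass maintaining a defaultdict of running maxima and then multiplying its values, B first collects the distinct colors and then, per color, rescans all games to take that color's maximum (baseline 0, as the defaultdict gives), multiplying directly.
import Mathlib
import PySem

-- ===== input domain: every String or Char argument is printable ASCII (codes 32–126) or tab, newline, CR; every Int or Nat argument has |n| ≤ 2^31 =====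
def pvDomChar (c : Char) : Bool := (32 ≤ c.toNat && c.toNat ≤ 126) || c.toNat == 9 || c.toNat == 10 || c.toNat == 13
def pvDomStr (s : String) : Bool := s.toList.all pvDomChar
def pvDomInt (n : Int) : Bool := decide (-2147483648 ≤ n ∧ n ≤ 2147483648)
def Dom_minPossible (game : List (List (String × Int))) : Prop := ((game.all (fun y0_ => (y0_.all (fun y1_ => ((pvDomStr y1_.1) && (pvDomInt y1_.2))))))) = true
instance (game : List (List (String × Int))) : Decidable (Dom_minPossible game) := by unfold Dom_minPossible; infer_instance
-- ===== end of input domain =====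

-- B gathers the distinct colors first and rescans the games per color instead of A's
-- single fused pass through a defaultdict of running maxima; same result, different shape.

-- ===== PORT A =====
-- `maxx[color]` on a defaultdict(int) materializes a 0 entry; the else-branch insert
-- writes back that materialized value (a no-op on existing keys), which is exact.
def minPossible (game : List (List (String × Int))) : Int :=
  let maxx : PySem.Dict String Int :=
    game.foldl (fun maxx g =>
      (PySem.Dict.ofList g).items.foldl (fun maxx p =>
        if p.2 > maxx.getD p.1 0 then maxx.insert p.1 p.2
        else maxx.insert p.1 (maxx.getD p.1 0)) maxx)
      PySem.Dict.empty
  maxx.items.foldl (fun power p => power * p.2) 1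

-- ===== PORT B =====
def minPossible_alt (game : List (List (String × Int))) : Int :=
  let colors : PySem.Set String :=
    game.foldl (fun s g => PySem.Set.update s (PySem.Dict.ofList g).keys) []
  colors.foldl (fun power c =>
    power * game.foldl (fun m g =>
      let v := (PySem.Dict.ofList g).getD c 0
      if v > m then v else m) 0) 1

-- ===== PRECONDITION & SPEC =====
def Spec_minPossible (game : List (List (String × Int))) (out : Int) : Prop := out = minPossible_alt game
instance (game : List (List (String × Int))) (out : Int) : Decidable (Spec_minPossible game out) := by unfold Spec_minPossible; infer_instance

-- ===== CLAIM (what is proved, stated in full; the proofs are below) =====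
def Claim_equal_minPossible : Prop := ∀ (game : List (List (String × Int))), Dom_minPossible game → Spec_minPossible game (minPossible game)

-- ===== LEMMAS AND PROOFS =====

-- A's inner-loop body, written as a single insert.
theorem pv_stepA_eq (d : PySem.Dict String Int) (p : String × Int) :
    (if p.2 > d.getD p.1 0 then d.insert p.1 p.2 else d.insert p.1 (d.getD p.1 0))
      = d.insert p.1 (if p.2 > d.getD p.1 0 then p.2 else d.getD p.1 0) := by
  split <;> rfl

-- what A's inner-loop body does to a single slot c of maxx
def pvPhi (c : String) (m : Int) (p : String × Int) : Int :=
  if p.1 = c then (if p.2 > m then p.2 else m) else m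

theorem pv_stepA_getD (d : PySem.Dict String Int) (p : String × Int) (c : String) :
    (d.insert p.1 (if p.2 > d.getD p.1 0 then p.2 else d.getD p.1 0)).getD c 0
      = pvPhi c (d.getD c 0) p := by
  rw [PySem.Dict.getD_insert, pvPhi]
  by_cases h : c = p.1
  · subst h; simp
  · rw [if_neg h, if_neg (fun e => h e.symm)]

theorem pv_inner_getD (l : List (String × Int)) (d : PySem.Dict String Int) (c : String) :
    (l.foldl (fun d p => d.insert p.1 (if p.2 > d.getD p.1 0 then p.2 else d.getD p.1 0)) d).getD c 0
      = l.foldl (pvPhi c) (d.getD c 0) := by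
  induction l generalizing d with
  | nil => rfl
  | cons p l ih => simp only [List.foldl_cons]; rw [ih, pv_stepA_getD]

theorem pv_phi_not_mem (c : String) (l : List (String × Int)) (h : c ∉ l.map Prod.fst)
    (m : Int) : l.foldl (pvPhi c) m = m := by
  induction l generalizing m with
  | nil => rfl
  | cons p l ih =>
    simp only [List.map_cons, List.mem_cons, not_or] at h
    simp only [List.foldl_cons, pvPhi, if_neg (fun e : p.1 = c => h.1 e.symm)]
    exact ih h.2 m

-- one game's items update slot c exactly like B's per-game max step
theorem pv_game_fold (c : String) (g : PySem.Dict String Int) (hn : g.keys.Nodup)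
    (m : Int) (hm : 0 ≤ m) :
    g.items.foldl (pvPhi c) m = if g.getD c 0 > m then g.getD c 0 else m := by
  by_cases hc : g.contains c = true
  · have hsome : (g.get? c).isSome := by rw [← PySem.Dict.contains_eq_isSome_get?, hc]
    obtain ⟨v, hv⟩ := Option.isSome_iff_exists.mp hsome
    have hmem : (c, v) ∈ g.items := PySem.Dict.mem_items_of_get?_eq_some g hv
    have hget : g.getD c 0 = v := PySem.Dict.getD_of_get?_eq_some g 0 hv
    obtain ⟨l1, l2, hsplit⟩ := List.append_of_mem hmem
    have hkeys : g.keys = g.items.map Prod.fst := rfl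
    rw [hkeys, hsplit, List.map_append, List.map_cons] at hn
    obtain ⟨-, hn2, hdisj⟩ := List.nodup_append.mp hn
    have h1 : c ∉ l1.map Prod.fst := fun hin => hdisj c hin c (by simp) rfl
    have h2 : c ∉ l2.map Prod.fst := (List.nodup_cons.mp hn2).1
    rw [hsplit, List.foldl_append, pv_phi_not_mem c l1 h1, List.foldl_cons]
    have hstep : pvPhi c m (c, v) = if v > m then v else m := by simp [pvPhi]
    rw [hstep, hget]
    split <;> rw [pv_phi_not_mem c l2 h2]
  · have hnk : c ∉ g.keys := fun hmem =>
      hc ((PySem.Dict.contains_iff_mem_keys g c).mpr hmem)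
    have hget : g.getD c 0 = 0 :=
      PySem.Dict.getD_of_not_contains g 0 (by simpa using hc)
    rw [pv_phi_not_mem c g.items hnk, hget, if_neg (by omega)]

-- A's fused maxx slot fold equals B's per-color rescan, for every color
theorem pv_AB (c : String) (game : List (List (String × Int))) (m : Int) (hm : 0 ≤ m) :
    game.foldl (fun m g => (PySem.Dict.ofList g).items.foldl (pvPhi c) m) m
      = game.foldl (fun m g =>
          if (PySem.Dict.ofList g).getD c 0 > m then (PySem.Dict.ofList g).getD c 0 else m) m := by
  induction game generalizing m with
  | nil => rfl
  | cons g gs ih =>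
    simp only [List.foldl_cons]
    rw [pv_game_fold c _ (PySem.Dict.nodup_keys_ofList g) m hm]
    exact ih _ (by split <;> omega)

theorem pv_outer_getD (game : List (List (String × Int))) (d : PySem.Dict String Int) (c : String) :
    (game.foldl (fun d g =>
        (PySem.Dict.ofList g).items.foldl
          (fun d p => d.insert p.1 (if p.2 > d.getD p.1 0 then p.2 else d.getD p.1 0)) d) d).getD c 0
      = game.foldl (fun m g => (PySem.Dict.ofList g).items.foldl (pvPhi c) m) (d.getD c 0) := by
  induction game generalizing d with
  | nil => rfl
  | cons g gs ih =>
    simp only [List.foldl_cons]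
    rw [ih, pv_inner_getD]

theorem pv_outer_keys (game : List (List (String × Int))) (d : PySem.Dict String Int) :
    (game.foldl (fun d g =>
        (PySem.Dict.ofList g).items.foldl
          (fun d p => d.insert p.1 (if p.2 > d.getD p.1 0 then p.2 else d.getD p.1 0)) d) d).keys
      = game.foldl (fun s g => PySem.Set.update s (PySem.Dict.ofList g).keys) d.keys := by
  induction game generalizing d with
  | nil => rfl
  | cons g gs ih =>
    simp only [List.foldl_cons]
    rw [ih, PySem.Dict.keys_foldl_insert_key]
    rfl

theorem pv_outer_nodup (game : List (List (String × Int))) (d : PySem.Dict String Int)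
    (h : d.keys.Nodup) :
    (game.foldl (fun d g =>
        (PySem.Dict.ofList g).items.foldl
          (fun d p => d.insert p.1 (if p.2 > d.getD p.1 0 then p.2 else d.getD p.1 0)) d) d).keys.Nodup := by
  induction game generalizing d with
  | nil => exact h
  | cons g gs ih =>
    simp only [List.foldl_cons]
    exact ih _ (PySem.Dict.nodup_keys_foldl_insert_key _ _ _ _ h)

-- ===== VERDICT (by name: the statement is the Claim_ definition above) =====
theorem minPossible_spec : Claim_equal_minPossible := by
  intro game _
  show minPossible game = minPossible_alt game
  unfold minPossible minPossible_alt
  simp only [pv_stepA_eq]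
  set M : PySem.Dict String Int :=
    game.foldl (fun maxx g =>
      (PySem.Dict.ofList g).items.foldl
        (fun maxx p => maxx.insert p.1 (if p.2 > maxx.getD p.1 0 then p.2 else maxx.getD p.1 0))
        maxx) PySem.Dict.empty with hM
  have hnodup : M.keys.Nodup := pv_outer_nodup game PySem.Dict.empty (by simp)
  have hkeys : M.keys = game.foldl (fun s g => PySem.Set.update s (PySem.Dict.ofList g).keys) [] := by
    rw [hM, pv_outer_keys]; simp
  have hgetD : ∀ c, M.getD c 0
      = game.foldl (fun m g =>
          if (PySem.Dict.ofList g).getD c 0 > m then (PySem.Dict.ofList g).getD c 0 else m) 0 := by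
    intro c
    rw [hM, pv_outer_getD]
    simp only [PySem.Dict.getD_empty]
    exact pv_AB c game 0 le_rfl
  rw [PySem.Dict.items_eq_map_keys M hnodup 0, List.foldl_map, hkeys]
  simp only [hgetD]
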